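-- pv_equiv track=rewrite | github.com/Lynguyen237/practice_probs | frog_cross_river.py | frog_cross_river
-- ===== SOURCE A (Python) =====
-- def frog_cross_river(X, A):
--
--     if len(A) < X:
--         return -1
--
--     current_path_set = set() # Empty set to track the current path as we loop through the array later
--
--     for i in range(len(A)):
--         current_path_set.add(A[i]) # Add the position to the current_path
--         if len(current_path_set) == X: # If the length of the current path is the same as the number of steps needed
--             return i
--
--     return -1
-- ===== SOURCE B (Python) =====
-- def frog_cross_river(X, A):
--     # Map each position to the index of its first occurrence (one pass).
--     firsts = {}
--     for i, a in enumerate(A):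
--         if a not in firsts:
--             firsts[a] = i
--     if X <= 0 or len(firsts) < X:
--         return -1
--     # The X-th smallest first-occurrence index is where the distinct count
--     # first reaches X.
--     return sorted(firsts.values())[X - 1]
-- ===== Notes on version B (the rewrite author's own statement) =====
-- stated objective: alternative
-- what changed: Instead of one short-circuiting scan that grows a set and returns as soon as its size hits X, B builds a value-to-first-occurrence-index dict in one full pass and then selects the X-th smallest first-occurrence index from its values.
import Mathlib
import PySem

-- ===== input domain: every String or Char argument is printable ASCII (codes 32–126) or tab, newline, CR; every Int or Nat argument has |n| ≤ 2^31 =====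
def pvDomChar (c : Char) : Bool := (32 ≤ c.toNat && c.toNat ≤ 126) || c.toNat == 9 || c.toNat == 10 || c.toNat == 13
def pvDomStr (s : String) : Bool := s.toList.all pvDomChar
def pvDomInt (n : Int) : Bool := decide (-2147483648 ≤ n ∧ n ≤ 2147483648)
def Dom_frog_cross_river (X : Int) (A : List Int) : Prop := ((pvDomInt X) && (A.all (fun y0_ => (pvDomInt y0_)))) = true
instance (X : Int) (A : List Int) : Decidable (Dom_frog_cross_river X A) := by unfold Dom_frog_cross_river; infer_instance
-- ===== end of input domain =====

-- B replaces A's short-circuiting scan (grow a set, return when its size hits X) by a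
-- first-occurrence-index table plus selection of the X-th smallest value; same results, similar cost.


-- ===== PORT A =====
-- A's `for i in range(len(A))` loop: the set of seen positions, the running index i, and
-- the elements still to visit; early `return i` is the non-recursive branch.
def frogA_loop (X : Int) : PySem.Set Int → Int → List Int → Int
  | _, _, [] => -1
  | seen, i, a :: rest =>
      let seen' := PySem.Set.add seen a
      if (seen'.length : Int) = X then i else frogA_loop X seen' (i + 1) rest

def frog_cross_river (X : Int) (A : List Int) : Int :=
  if (A.length : Int) < X then -1
  else frogA_loop X PySem.Set.empty 0 A

-- ===== PORT B =====
-- Source B's dict-building loop: `if a not in firsts: firsts[a] = i`.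
def frogB_firsts : PySem.Dict Int Int → Int → List Int → PySem.Dict Int Int
  | d, _, [] => d
  | d, i, a :: rest => frogB_firsts (if d.contains a then d else d.insert a i) (i + 1) rest

def frog_cross_river_alt (X : Int) (A : List Int) : Int :=
  let firsts := frogB_firsts PySem.Dict.empty 0 A
  if X ≤ 0 ∨ (firsts.size : Int) < X then -1
  else
    -- sorted(firsts.values())[X - 1]; the index X-1 is in range here, so the default 0 is never used
    PySem.List.pyGetD (PySem.List.sorted firsts.values (fun v => v) false) (X - 1) 0

-- ===== PRECONDITION & SPEC =====
def Spec_frog_cross_river (X : Int) (A : List Int) (out : Int) : Prop := out = frog_cross_river_alt X A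
instance (X : Int) (A : List Int) (out : Int) : Decidable (Spec_frog_cross_river X A out) := by unfold Spec_frog_cross_river; infer_instance

-- ===== CLAIM (what is proved, stated in full; the proofs are below) =====
def Claim_equal_frog_cross_river : Prop := ∀ (X : Int) (A : List Int), Dom_frog_cross_river X A → Spec_frog_cross_river X A (frog_cross_river X A)

-- ===== LEMMAS AND PROOFS =====

-- With X ≤ 0 A's loop can never stop: the seen set is nonempty after the first add.
theorem frogA_loop_nonpos (X : Int) (hX : X ≤ 0) :
    ∀ (rest : List Int) (s : PySem.Set Int) (i : Int), frogA_loop X s i rest = -1 := by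
  intro rest
  induction rest with
  | nil => intro s i; rfl
  | cons a t ih =>
      intro s i
      have hne : (PySem.Set.add s a) ≠ [] := by
        simp only [PySem.Set.add, PySem.Set.contains]
        split_ifs with h
        · exact List.ne_nil_of_mem (by simpa using h)
        · simp
      have hlen : 0 < (PySem.Set.add s a).length := List.length_pos_iff.mpr hne
      simp only [frogA_loop]
      rw [if_neg (by omega)]
      exact ih _ _

-- frogB_firsts only appends items.
theorem frogB_firsts_items_prefix :
    ∀ (rest : List Int) (d : PySem.Dict Int Int) (i : Int),
      ∃ t, (frogB_firsts d i rest).items = d.items ++ t := by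
  intro rest
  induction rest with
  | nil => intro d i; exact ⟨[], (List.append_nil _).symm⟩
  | cons a t ih =>
      intro d i
      by_cases hc : d.contains a
      · simpa only [frogB_firsts, hc, if_true] using ih d (i + 1)
      · have hcf : d.contains a = false := by simpa using hc
        obtain ⟨tl, htl⟩ := ih (d.insert a i) (i + 1)
        refine ⟨(a, i) :: tl, ?_⟩
        simp only [frogB_firsts, hcf, Bool.false_eq_true, if_false]
        rw [htl, PySem.Dict.items_insert_of_not_contains d i hcf]
        simp

theorem frogB_firsts_size_le :
    ∀ (rest : List Int) (d : PySem.Dict Int Int) (i : Int),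
      (frogB_firsts d i rest).size ≤ d.size + rest.length := by
  intro rest
  induction rest with
  | nil => intro d i; simp [frogB_firsts]
  | cons a t ih =>
      intro d i
      by_cases hc : d.contains a
      · simp only [frogB_firsts, hc, if_true, List.length_cons]
        have := ih d (i + 1); omega
      · have hcf : d.contains a = false := by simpa using hc
        simp only [frogB_firsts, hcf, Bool.false_eq_true, if_false, List.length_cons]
        have h1 : (d.insert a i).size = d.size + 1 := by
          simp [PySem.Dict.size, PySem.Dict.items_insert_of_not_contains d i hcf]
        have := ih (d.insert a i) (i + 1); omega

-- the invariant: values are strictly increasing and below the running index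
theorem frogB_firsts_values_sorted :
    ∀ (rest : List Int) (d : PySem.Dict Int Int) (i : Int),
      d.values.Pairwise (· < ·) → (∀ v ∈ d.values, v < i) →
      ((frogB_firsts d i rest).values.Pairwise (· < ·) ∧
       ∀ v ∈ (frogB_firsts d i rest).values, v < i + rest.length) := by
  intro rest
  induction rest with
  | nil => intro d i hp hb; exact ⟨hp, by simpa using hb⟩
  | cons a t ih =>
      intro d i hp hb
      by_cases hc : d.contains a
      · simp only [frogB_firsts, hc, if_true, List.length_cons]
        have := ih d (i + 1) hp (fun v hv => lt_trans (hb v hv) (by omega))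
        refine ⟨this.1, fun v hv => ?_⟩
        have h2 := this.2 v hv; push_cast at h2 ⊢; omega
      · have hcf : d.contains a = false := by simpa using hc
        simp only [frogB_firsts, hcf, Bool.false_eq_true, if_false, List.length_cons]
        have hv' : (d.insert a i).values = d.values ++ [i] := by
          simp [PySem.Dict.values, PySem.Dict.items_insert_of_not_contains d i hcf]
        have hp' : (d.insert a i).values.Pairwise (· < ·) := by
          rw [hv']; exact List.pairwise_append.mpr ⟨hp, by simp, by simpa using hb⟩
        have hb' : ∀ v ∈ (d.insert a i).values, v < i + 1 := by
          rw [hv']; intro v hv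
          rcases List.mem_append.mp hv with h | h
          · exact lt_trans (hb v h) (by omega)
          · simp at h; omega
        have := ih (d.insert a i) (i + 1) hp' hb'
        refine ⟨this.1, fun v hv => ?_⟩
        have h2 := this.2 v hv; push_cast at h2 ⊢; omega

theorem frogB_keys_length (d : PySem.Dict Int Int) : d.keys.length = d.size := by
  simp [PySem.Dict.keys, PySem.Dict.size]

theorem frogB_values_length (d : PySem.Dict Int Int) : d.values.length = d.size := by
  simp [PySem.Dict.values, PySem.Dict.size]

-- Main correspondence: A's loop from state (d.keys, i) equals B's table lookup.
theorem frog_main (X : Int) :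
    ∀ (rest : List Int) (d : PySem.Dict Int Int) (i : Int),
      d.values.Pairwise (· < ·) → (∀ v ∈ d.values, v < i) → (d.size : Int) < X →
      frogA_loop X d.keys i rest =
        (if ((frogB_firsts d i rest).size : Int) < X then -1
         else PySem.List.pyGetD (frogB_firsts d i rest).values (X - 1) 0) := by
  intro rest
  induction rest with
  | nil =>
      intro d i _ _ hX
      simp only [frogA_loop, frogB_firsts]
      rw [if_pos hX]
  | cons a t ih =>
      intro d i hp hb hX
      by_cases hc : d.contains a
      · -- already seen: set unchanged, dict unchanged
        have hmem : a ∈ d.keys := (PySem.Dict.contains_iff_mem_keys d a).mp hc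
        have hsadd : PySem.Set.add d.keys a = d.keys := by
          simp [PySem.Set.add, PySem.Set.contains, hmem]
        simp only [frogA_loop, frogB_firsts, hc, if_true, hsadd]
        rw [if_neg (by rw [frogB_keys_length]; omega)]
        exact ih d (i + 1) hp (fun v hv => lt_trans (hb v hv) (by omega)) hX
      · -- new element
        have hcf : d.contains a = false := by simpa using hc
        have hmem : a ∉ d.keys := fun h => by
          simp [(PySem.Dict.contains_iff_mem_keys d a).mpr h] at hcf
        have hsadd : PySem.Set.add d.keys a = d.keys ++ [a] := by
          simp [PySem.Set.add, PySem.Set.contains, hmem]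
        have hitems : (d.insert a i).items = d.items ++ [(a, i)] :=
          PySem.Dict.items_insert_of_not_contains d i hcf
        have hsize : (d.insert a i).size = d.size + 1 := by
          simp [PySem.Dict.size, hitems]
        have hvals : (d.insert a i).values = d.values ++ [i] := by
          simp [PySem.Dict.values, hitems]
        have hlen1 : ((d.keys ++ [a]).length : Int) = (d.size : Int) + 1 := by
          simp [frogB_keys_length]
        simp only [frogA_loop, frogB_firsts, hcf, Bool.false_eq_true, if_false, hsadd]
        by_cases hhit : ((d.keys ++ [a]).length : Int) = X
        · -- A returns i here; B's table already holds X entries, value index X-1 is i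
          rw [if_pos hhit]
          have hXval : (d.size : Int) + 1 = X := by omega
          obtain ⟨tl, htl⟩ := frogB_firsts_items_prefix t (d.insert a i) (i + 1)
          have hfsize : (frogB_firsts (d.insert a i) (i + 1) t).size =
              (d.insert a i).size + tl.length := by
            simp [PySem.Dict.size, htl]
          have hfvals : (frogB_firsts (d.insert a i) (i + 1) t).values =
              d.values ++ i :: tl.map (·.2) := by
            simp [PySem.Dict.values, htl, hitems]
          rw [if_neg (by rw [hfsize, hsize]; push_cast; omega)]
          have hidx : X - 1 = ((d.values.length : Nat) : Int) := by
            rw [frogB_values_length]; omega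
          rw [hfvals, hidx, PySem.List.pyGetD_natCast]
          simp
        · rw [if_neg hhit]
          have hX' : ((d.insert a i).size : Int) < X := by rw [hsize]; push_cast; omega
          have hkeys : (d.insert a i).keys = d.keys ++ [a] :=
            PySem.Dict.keys_insert_of_not_contains d i hcf
          have hp' : (d.insert a i).values.Pairwise (· < ·) := by
            rw [hvals]; exact List.pairwise_append.mpr ⟨hp, by simp, by simpa using hb⟩
          have hb' : ∀ v ∈ (d.insert a i).values, v < i + 1 := by
            rw [hvals]; intro v hv
            rcases List.mem_append.mp hv with h | h
            · exact lt_trans (hb v h) (by omega)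
            · simp at h; omega
          rw [← hkeys]
          exact ih (d.insert a i) (i + 1) hp' hb' hX'

-- ===== VERDICT (by name: the statement is the Claim_ definition above) =====
theorem frog_cross_river_spec : Claim_equal_frog_cross_river := by
  intro X A _
  show frog_cross_river X A = frog_cross_river_alt X A
  have halt : frog_cross_river_alt X A =
      if X ≤ 0 ∨ ((frogB_firsts PySem.Dict.empty 0 A).size : Int) < X then -1
      else PySem.List.pyGetD
        (PySem.List.sorted (frogB_firsts PySem.Dict.empty 0 A).values (fun v => v) false)
        (X - 1) 0 := rfl
  rw [halt]
  unfold frog_cross_river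
  by_cases hX0 : X ≤ 0
  · rw [if_neg (by omega), if_pos (Or.inl hX0)]
    exact frogA_loop_nonpos X hX0 A PySem.Set.empty 0
  · have hX0' : 0 < X := by omega
    by_cases hlen : (A.length : Int) < X
    · rw [if_pos hlen]
      have hsz := frogB_firsts_size_le A PySem.Dict.empty 0
      have hsz0 : (PySem.Dict.empty : PySem.Dict Int Int).size = 0 := rfl
      rw [if_pos (Or.inr (by rw [hsz0] at hsz; omega))]
    · rw [if_neg hlen]
      have hv0 : (PySem.Dict.empty : PySem.Dict Int Int).values = [] := rfl
      have hsz0 : (PySem.Dict.empty : PySem.Dict Int Int).size = 0 := rfl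
      have hk0 : (PySem.Dict.empty : PySem.Dict Int Int).keys = PySem.Set.empty := rfl
      have hmain := frog_main X A PySem.Dict.empty 0
        (by rw [hv0]; exact List.Pairwise.nil)
        (by rw [hv0]; intro v hv; simp at hv)
        (by rw [hsz0]; push_cast; omega)
      have hsorted : PySem.List.sorted (frogB_firsts PySem.Dict.empty 0 A).values (fun v => v) false
          = (frogB_firsts PySem.Dict.empty 0 A).values := by
        apply PySem.List.sorted_eq_self_of_pairwise
        have := (frogB_firsts_values_sorted A PySem.Dict.empty 0
          (by rw [hv0]; exact List.Pairwise.nil)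
          (by rw [hv0]; intro v hv; simp at hv)).1
        exact this.imp (fun h => le_of_lt h)
      rw [hk0] at hmain
      rw [hmain, hsorted]
      by_cases hbig : ((frogB_firsts PySem.Dict.empty 0 A).size : Int) < X
      · rw [if_pos hbig, if_pos (Or.inr hbig)]
      · rw [if_neg hbig, if_neg (not_or.mpr ⟨by omega, hbig⟩)]
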